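-- pv_equiv track=rewrite | github.com/akileshr07/redex_bot | tweet_builder.py | _trim_hashtags
-- ===== SOURCE A (Python) =====
-- from typing import List, Tuple
--
-- MAX_TWEET_LEN = 280
--
-- def _trim_hashtags(base_text: str, hashtags: List[str]) -> Tuple[str, List[str]]:
--     current_hashtags = hashtags[:]
--     while current_hashtags:
--         tweet = base_text + " " + " ".join(current_hashtags)
--         if len(tweet) <= MAX_TWEET_LEN:
--             return tweet, current_hashtags
--         current_hashtags.pop()  # remove last hashtag
--     # Return without hashtags
--     return base_text, []
-- ===== SOURCE B (Python) =====
-- from typing import List, Tuple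
--
-- MAX_TWEET_LEN = 280
--
-- def _trim_hashtags(base_text: str, hashtags: List[str]) -> Tuple[str, List[str]]:
--     # Single forward pass: each kept hashtag costs len(tag)+1 (separator or the
--     # leading space), so the tweet with k hashtags has length len(base_text)+that sum.
--     budget = MAX_TWEET_LEN - len(base_text)
--     k = 0
--     for tag in hashtags:
--         budget -= len(tag) + 1
--         if budget < 0:
--             break
--         k += 1
--     if k == 0:
--         return base_text, []
--     kept = hashtags[:k]
--     return base_text + " " + " ".join(kept), kept
-- ===== Notes on version B (the rewrite author's own statement) =====
-- stated objective: faster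
-- what changed: Replaces A's pop-from-the-end loop, which rebuilds the full joined tweet on every iteration, with a single forward pass over a running length budget (each hashtag costs len+1) that finds the largest fitting prefix and builds the tweet once.
import Mathlib
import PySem

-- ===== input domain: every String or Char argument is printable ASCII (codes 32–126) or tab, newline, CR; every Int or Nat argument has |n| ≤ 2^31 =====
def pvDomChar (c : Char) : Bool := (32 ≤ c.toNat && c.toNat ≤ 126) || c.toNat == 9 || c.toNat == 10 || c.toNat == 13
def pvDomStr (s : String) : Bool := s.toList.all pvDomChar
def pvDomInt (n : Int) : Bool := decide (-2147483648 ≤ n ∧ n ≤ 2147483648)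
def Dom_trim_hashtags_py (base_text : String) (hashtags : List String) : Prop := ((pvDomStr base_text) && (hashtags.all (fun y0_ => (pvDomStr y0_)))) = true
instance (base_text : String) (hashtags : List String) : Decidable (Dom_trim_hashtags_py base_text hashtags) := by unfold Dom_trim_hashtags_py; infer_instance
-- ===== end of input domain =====

-- B replaces A's pop-and-rejoin loop (rebuilds the joined string each iteration) by one
-- forward pass with a running length budget and a single final join: O(total) vs O(n·total).

-- ===== PORT A =====
-- while current_hashtags: tweet = base + " " + " ".join(cur); if len ≤ 280: return; else pop last
def pvTrimA (base_text : String) : List String → String × List String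
  | [] => (base_text, [])
  | h :: t =>
    let tweet : List Char :=
      base_text.toList ++ ' ' :: PySem.Chars.join [' '] ((h :: t).map String.toList)
    if tweet.length ≤ 280 then (String.ofList tweet, h :: t)
    else pvTrimA base_text (h :: t).dropLast
termination_by l => l.length
decreasing_by simp

def trim_hashtags_py (base_text : String) (hashtags : List String) : String × List String :=
  pvTrimA base_text hashtags

-- ===== PORT B =====
-- for tag in hashtags: budget -= len(tag)+1; if budget < 0: break; k += 1
def pvScanB (budget : Int) : List String → Nat
  | [] => 0
  | h :: t =>
    let b' := budget - ((h.toList.length : Int) + 1)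
    if b' < 0 then 0 else pvScanB b' t + 1

def trim_hashtags_py_alt (base_text : String) (hashtags : List String) : String × List String :=
  let k := pvScanB (280 - (base_text.toList.length : Int)) hashtags
  if k = 0 then (base_text, [])
  else
    let kept := hashtags.take k
    (String.ofList (base_text.toList ++ ' ' :: PySem.Chars.join [' '] (kept.map String.toList)), kept)

-- ===== PRECONDITION & SPEC =====
def Spec_trim_hashtags_py (base_text : String) (hashtags : List String) (out : String × List String) : Prop := out = trim_hashtags_py_alt base_text hashtags
instance (base_text : String) (hashtags : List String) (out : String × List String) : Decidable (Spec_trim_hashtags_py base_text hashtags out) := by unfold Spec_trim_hashtags_py; infer_instance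

-- ===== CLAIM (what is proved, stated in full; the proofs are below) =====
def Claim_equal_trim_hashtags_py : Prop := ∀ (base_text : String) (hashtags : List String), Dom_trim_hashtags_py base_text hashtags → Spec_trim_hashtags_py base_text hashtags (trim_hashtags_py base_text hashtags)

-- ===== LEMMAS AND PROOFS =====

-- total cost of keeping these hashtags: each costs its length plus one separator/space
def pvWeight (xs : List String) : Nat := (xs.map (fun s => s.toList.length + 1)).sum

theorem pvWeight_nil : pvWeight [] = 0 := by simp [pvWeight]

theorem pvWeight_cons (h : String) (t : List String) :
    pvWeight (h :: t) = h.toList.length + 1 + pvWeight t := by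
  simp [pvWeight]

-- length of " ".join(h::t) is weight minus the one leading space
theorem pvJoin_length (h : String) (t : List String) :
    (PySem.Chars.join [' '] ((h :: t).map String.toList)).length + 1 = pvWeight (h :: t) := by
  induction t generalizing h with
  | nil => simp [PySem.Chars.join_singleton, pvWeight]
  | cons h2 t ih =>
    rw [List.map_cons, List.map_cons, PySem.Chars.join_cons_cons, pvWeight_cons]
    have h2t := ih h2
    simp only [List.map_cons] at h2t
    simp only [List.length_append, List.length_cons, List.length_nil]
    omega

theorem pvScanB_le_length (b : Int) (xs : List String) : pvScanB b xs ≤ xs.length := by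
  induction xs generalizing b with
  | nil => simp [pvScanB]
  | cons h t ih =>
    simp only [pvScanB, List.length_cons]
    split
    · omega
    · exact Nat.succ_le_succ (ih _)

theorem pvScanB_full (b : Int) (xs : List String) (hw : (pvWeight xs : Int) ≤ b) :
    pvScanB b xs = xs.length := by
  induction xs generalizing b with
  | nil => simp [pvScanB]
  | cons h t ih =>
    rw [pvWeight_cons] at hw
    have hw' : (pvWeight t : Int) ≤ b - ((h.toList.length : Int) + 1) := by push_cast at hw ⊢; omega
    have hnn : ¬ (b - ((h.toList.length : Int) + 1) < 0) := by
      have : (0 : Int) ≤ (pvWeight t : Int) := by positivity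
      omega
    simp only [pvScanB, hnn, if_false, List.length_cons, ih _ hw']

theorem pvScanB_snoc (b : Int) (xs : List String) (y : String)
    (hw : b < (pvWeight (xs ++ [y]) : Int)) :
    pvScanB b (xs ++ [y]) = pvScanB b xs := by
  induction xs generalizing b with
  | nil =>
    rw [List.nil_append, pvWeight_cons, pvWeight_nil] at hw
    simp only [List.nil_append, pvScanB]
    have hneg : b - ((y.toList.length : Int) + 1) < 0 := by push_cast at hw; omega
    rw [if_pos hneg]
  | cons h t ih =>
    rw [List.cons_append] at hw ⊢
    rw [pvWeight_cons] at hw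
    simp only [pvScanB]
    split
    · rfl
    · rename_i hb
      rw [ih _ (by omega)]

theorem pvAlt_snoc (base_text : String) (xs : List String) (y : String)
    (hw : (280 : Int) - (base_text.toList.length : Int) < (pvWeight (xs ++ [y]) : Int)) :
    trim_hashtags_py_alt base_text (xs ++ [y]) = trim_hashtags_py_alt base_text xs := by
  unfold trim_hashtags_py_alt
  rw [pvScanB_snoc _ _ _ hw]
  have hk := pvScanB_le_length (280 - (base_text.toList.length : Int)) xs
  by_cases h0 : pvScanB (280 - (base_text.toList.length : Int)) xs = 0
  · rw [if_pos h0, if_pos h0]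
  · simp only [if_neg h0, List.take_append_of_le_length hk]

theorem pvTrimA_eq_alt (base_text : String) (cur : List String) :
    pvTrimA base_text cur = trim_hashtags_py_alt base_text cur := by
  induction cur using pvTrimA.induct base_text with
  | case1 => simp [pvTrimA, trim_hashtags_py_alt, pvScanB]
  | case2 h t tweet hfit =>
    have hJ := pvJoin_length h t
    have hlen : tweet.length = base_text.toList.length + pvWeight (h :: t) := by
      simp only [tweet, List.length_append, List.length_cons]
      omega
    have hwle : (pvWeight (h :: t) : Int) ≤ 280 - (base_text.toList.length : Int) := by
      rw [hlen] at hfit; omega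
    rw [pvTrimA]
    show (if tweet.length ≤ 280 then (String.ofList tweet, h :: t)
          else pvTrimA base_text (h :: t).dropLast) = trim_hashtags_py_alt base_text (h :: t)
    rw [if_pos hfit]
    unfold trim_hashtags_py_alt
    rw [pvScanB_full _ _ hwle]
    simp only [List.length_cons, Nat.succ_ne_zero, if_false, List.take_succ_cons,
      List.take_length, tweet, List.map_cons]
  | case3 h t tweet hfit ih =>
    have hJ := pvJoin_length h t
    have hlen : tweet.length = base_text.toList.length + pvWeight (h :: t) := by
      simp only [tweet, List.length_append, List.length_cons]
      omega
    have hwgt : (280 : Int) - (base_text.toList.length : Int) < (pvWeight (h :: t) : Int) := by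
      rw [hlen] at hfit; omega
    rw [pvTrimA]
    show (if tweet.length ≤ 280 then (String.ofList tweet, h :: t)
          else pvTrimA base_text (h :: t).dropLast) = trim_hashtags_py_alt base_text (h :: t)
    rw [if_neg hfit, ih]
    have hsplit : h :: t = (h :: t).dropLast ++ [(h :: t).getLast (by simp)] :=
      (List.dropLast_append_getLast (by simp)).symm
    calc trim_hashtags_py_alt base_text (h :: t).dropLast
        = trim_hashtags_py_alt base_text ((h :: t).dropLast ++ [(h :: t).getLast (by simp)]) := by
          rw [pvAlt_snoc]
          rw [← hsplit]; exact hwgt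
      _ = trim_hashtags_py_alt base_text (h :: t) := by rw [← hsplit]

-- ===== VERDICT (by name: the statement is the Claim_ definition above) =====
theorem trim_hashtags_py_spec : Claim_equal_trim_hashtags_py := by
  intro base_text hashtags _
  unfold Spec_trim_hashtags_py trim_hashtags_py
  exact pvTrimA_eq_alt base_text hashtags
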